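-- pv_equiv track=rewrite | github.com/ymougenel/advent-of-code | 2025/day7/main.py | run_classical_line
-- ===== SOURCE A (Python) =====
-- def run_classical_line(maze, i):
--     count = 0
--     for j in range(len(maze[0])):
--         if maze[i - 1][j] in ['S', '|']:
--             if maze[i][j] == "^":
--                 count += 1
--                 if j > 0 and maze[i][j - 1] != "^":
--                     maze[i][j - 1] = "|"
--                 if j < len(maze[0]) - 1 and maze[i][j + 1] != "^":
--                     maze[i][j + 1] = "|"
--             else:
--                 maze[i][j] = "|"
--     return count
-- ===== SOURCE B (Python) =====
-- def run_classical_line(maze, i):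
--     # Pure count: marked writes in A never flip a cell's '^' status, so the count
--     # only depends on the original grid. (A also mutates maze[i] in place; B does not.)
--     return sum(1 for j in range(len(maze[0]))
--                if maze[i - 1][j] in ('S', '|') and maze[i][j] == '^')
-- ===== Notes on version B (the rewrite author's own statement) =====
-- stated objective: simpler
-- what changed: A interleaves in-place '|'-marking of row i with counting inside one stateful loop; B drops the state entirely and returns a single pure generator-sum over the original grid (A's writes never change whether a cell is '^', so the count is already determined by the input); B does not mutate maze, the equivalence is about the return value only.
import Mathlib
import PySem

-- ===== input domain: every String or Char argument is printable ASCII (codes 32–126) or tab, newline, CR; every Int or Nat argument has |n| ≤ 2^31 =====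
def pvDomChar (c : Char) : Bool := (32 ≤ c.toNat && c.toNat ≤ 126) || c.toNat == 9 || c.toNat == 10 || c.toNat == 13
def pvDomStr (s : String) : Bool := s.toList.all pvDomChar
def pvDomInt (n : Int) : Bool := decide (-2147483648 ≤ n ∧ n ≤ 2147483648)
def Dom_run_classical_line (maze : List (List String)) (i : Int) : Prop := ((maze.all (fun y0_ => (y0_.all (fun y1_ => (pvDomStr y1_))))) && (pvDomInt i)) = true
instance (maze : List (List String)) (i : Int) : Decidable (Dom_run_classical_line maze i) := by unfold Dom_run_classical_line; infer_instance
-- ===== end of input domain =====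

-- B replaces A's stateful mark-and-count loop by a pure one-pass count (A's '|'-writes never
-- change whether a cell is '^', so the count depends only on the original grid); the equivalence
-- proved here is about the RETURN value only: A mutates maze[i] in place, B does not mutate.

-- ===== PORT A =====
-- helper: Python `maze[r][c] = v` (no-op where Python would raise; Pre_ excludes those inputs)
def pvSetCell (mz : List (List String)) (r c : Int) (v : String) : List (List String) :=
  PySem.List.pySetD mz r (PySem.List.pySetD (PySem.List.pyGetD mz r []) c v)

-- helper: the body of A's `for j in range(len(maze[0]))` loop acting on the state (maze, count);
-- w is len(maze[0]), whose value no write of the loop ever changes.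
def pvStepA (i w : Int) (st : List (List String) × Int) (j : Int) : List (List String) × Int :=
  let mz := st.1
  let count := st.2
  if PySem.List.pyGetD (PySem.List.pyGetD mz (i-1) []) j "" = "S"
     ∨ PySem.List.pyGetD (PySem.List.pyGetD mz (i-1) []) j "" = "|" then
    if PySem.List.pyGetD (PySem.List.pyGetD mz i []) j "" = "^" then
      let count := count + 1
      let mz := if 0 < j ∧ PySem.List.pyGetD (PySem.List.pyGetD mz i []) (j-1) "" ≠ "^"
                then pvSetCell mz i (j-1) "|" else mz
      let mz := if j < w - 1 ∧ PySem.List.pyGetD (PySem.List.pyGetD mz i []) (j+1) "" ≠ "^"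
                then pvSetCell mz i (j+1) "|" else mz
      (mz, count)
    else (pvSetCell mz i j "|", count)
  else (mz, count)

def run_classical_line (maze : List (List String)) (i : Int) : Int :=
  ((PySem.List.pyRange 0 ((PySem.List.pyGetD maze 0 []).length : Int) 1).foldl
    (pvStepA i ((PySem.List.pyGetD maze 0 []).length : Int)) (maze, 0)).2

-- ===== PORT B =====
-- Source B is a single pure generator-sum; no mutation happens in B, so nothing else is modeled.
def run_classical_line_alt (maze : List (List String)) (i : Int) : Int :=
  ((PySem.List.pyRange 0 ((PySem.List.pyGetD maze 0 []).length : Int) 1).map (fun j =>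
    if (PySem.List.pyGetD (PySem.List.pyGetD maze (i-1) []) j "" = "S"
        ∨ PySem.List.pyGetD (PySem.List.pyGetD maze (i-1) []) j "" = "|")
       ∧ PySem.List.pyGetD (PySem.List.pyGetD maze i []) j "" = "^"
    then (1 : Int) else 0)).sum

-- ===== PRECONDITION & SPEC =====
-- Pre_ is exactly where Python A returns (otherwise A raises IndexError): maze nonempty, and —
-- unless row 0 is empty — row i-1 exists and spans the width of row 0, and every column whose
-- cell in row i-1 is 'S'/'|' lies inside row i (its right neighbour too when the cell is '^').
def Pre_run_classical_line (maze : List (List String)) (i : Int) : Prop :=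
  maze ≠ [] ∧
  ((PySem.List.pyGetD maze 0 []).length = 0 ∨
    (PySem.Raise.InRange maze.length (i-1) ∧
     (PySem.List.pyGetD maze 0 []).length ≤ (PySem.List.pyGetD maze (i-1) []).length ∧
     ∀ j : Nat, j < (PySem.List.pyGetD maze 0 []).length →
       ((PySem.List.pyGetD maze (i-1) []).getD j "" = "S"
        ∨ (PySem.List.pyGetD maze (i-1) []).getD j "" = "|") →
       (PySem.Raise.InRange maze.length i ∧
        j < (PySem.List.pyGetD maze i []).length ∧
        ((PySem.List.pyGetD maze i []).getD j "" = "^" →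
         j + 1 < (PySem.List.pyGetD maze 0 []).length →
         j + 1 < (PySem.List.pyGetD maze i []).length))))
instance (maze : List (List String)) (i : Int) : Decidable (Pre_run_classical_line maze i) := by
  unfold Pre_run_classical_line; infer_instance

def pvWitness_run_classical_line : List (List String) × Int := ([["S", "."], ["^", "."]], 1)

def Spec_run_classical_line (maze : List (List String)) (i : Int) (out : Int) : Prop := out = run_classical_line_alt maze i
instance (maze : List (List String)) (i : Int) (out : Int) : Decidable (Spec_run_classical_line maze i out) := by unfold Spec_run_classical_line; infer_instance

-- ===== CLAIM (what is proved, stated in full; the proofs are below) =====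
def Claim_equal_run_classical_line : Prop := ∀ (maze : List (List String)) (i : Int), Dom_run_classical_line maze i → Pre_run_classical_line maze i → Spec_run_classical_line maze i (run_classical_line maze i)

-- ===== LEMMAS AND PROOFS =====

-- the per-column contribution of B's sum
def pvContrib (maze : List (List String)) (i : Int) (j : Int) : Int :=
  if (PySem.List.pyGetD (PySem.List.pyGetD maze (i-1) []) j "" = "S"
      ∨ PySem.List.pyGetD (PySem.List.pyGetD maze (i-1) []) j "" = "|")
     ∧ PySem.List.pyGetD (PySem.List.pyGetD maze i []) j "" = "^" then 1 else 0

theorem pvIdx_lt {n : Nat} {i : Int} {k : Nat} (h : PySem.List.pyIdx? n i = some k) : k < n := by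
  unfold PySem.List.pyIdx? at h
  split_ifs at h <;> cases h <;> omega

theorem pvGetD_idx {α : Type} (mz : List α) (i : Int) (k : Nat) (d : α)
    (h : PySem.List.pyIdx? mz.length i = some k) :
    PySem.List.pyGetD mz i d = mz.getD k d := by
  simp [PySem.List.pyGetD, PySem.List.pyGet?, h, List.getD_eq_getElem?_getD]

theorem pvGetD_none {α : Type} (mz : List α) (i : Int) (d : α)
    (h : PySem.List.pyIdx? mz.length i = none) :
    PySem.List.pyGetD mz i d = d := by
  simp [PySem.List.pyGetD, PySem.List.pyGet?, h]

theorem pvGetD_nil {α : Type} (j : Int) (d : α) : PySem.List.pyGetD ([] : List α) j d = d := by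
  unfold PySem.List.pyGetD PySem.List.pyGet? PySem.List.pyIdx?
  split_ifs <;> simp

theorem pvSetD_idx {α : Type} (mz : List α) (i : Int) (k : Nat) (v : α)
    (h : PySem.List.pyIdx? mz.length i = some k) :
    PySem.List.pySetD mz i v = mz.set k v := by
  simp [PySem.List.pySetD, PySem.List.pySet?, h]

theorem pvColGet (row : List String) (j : Int) (d : String) (hj : 0 ≤ j) :
    PySem.List.pyGetD row j d = row.getD j.toNat d := by
  obtain ⟨m, rfl⟩ : ∃ m : Nat, j = (m : Int) := ⟨j.toNat, (Int.toNat_of_nonneg hj).symm⟩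
  simp

theorem pvStepA_len (i w : Int) (st : List (List String) × Int) (j : Int) :
    ((pvStepA i w st j).1).length = st.1.length := by
  dsimp only [pvStepA, pvSetCell]
  split_ifs <;> simp [PySem.List.length_pySetD]

theorem pvFold_const (i w : Int) (n : Nat)
    (H : ∀ mz : List (List String), mz.length = n → ∀ j : Int,
      ¬((PySem.List.pyGetD (PySem.List.pyGetD mz (i-1) []) j "" = "S"
         ∨ PySem.List.pyGetD (PySem.List.pyGetD mz (i-1) []) j "" = "|")
        ∧ PySem.List.pyGetD (PySem.List.pyGetD mz i []) j "" = "^")) :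
    ∀ (L : List Int) (mz : List (List String)) (c : Int), mz.length = n →
      (L.foldl (pvStepA i w) (mz, c)).2 = c := by
  intro L
  induction L with
  | nil => intro mz c _; rfl
  | cons j L ih =>
    intro mz c h
    have h2 : (pvStepA i w (mz, c) j).2 = c := by
      dsimp only [pvStepA]
      by_cases houter : (PySem.List.pyGetD (PySem.List.pyGetD mz (i-1) []) j "" = "S"
          ∨ PySem.List.pyGetD (PySem.List.pyGetD mz (i-1) []) j "" = "|")
      · have hinner : ¬ PySem.List.pyGetD (PySem.List.pyGetD mz i []) j "" = "^" :=
          fun hh => H mz h j ⟨houter, hh⟩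
        rw [if_pos houter, if_neg hinner]
      · rw [if_neg houter]
    calc ((j :: L).foldl (pvStepA i w) (mz, c)).2
        = (List.foldl (pvStepA i w)
            ((pvStepA i w (mz, c) j).1, (pvStepA i w (mz, c) j).2) L).2 := by
          rw [List.foldl_cons, Prod.mk.eta]
      _ = (List.foldl (pvStepA i w) ((pvStepA i w (mz, c) j).1, c) L).2 := by rw [h2]
      _ = c := ih _ c (by rw [pvStepA_len]; exact h)

theorem pvInvSet (cur0 row' : List String) (m : Nat)
    (h1 : row'.length = cur0.length)
    (h2 : ∀ c : Nat, (row'.getD c "" = "^" ↔ cur0.getD c "" = "^"))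
    (hne : row'.getD m "" ≠ "^") :
    (row'.set m "|").length = cur0.length ∧
    ∀ c : Nat, ((row'.set m "|").getD c "" = "^" ↔ cur0.getD c "" = "^") := by
  refine ⟨by simp [h1], fun c => ?_⟩
  by_cases hcm : c = m
  · subst hcm
    by_cases hlt : c < row'.length
    · rw [List.getD_eq_getElem?_getD, List.getElem?_set_self hlt]
      have hcur : ¬ cur0.getD c "" = "^" := fun hh => hne ((h2 c).mpr hh)
      exact ⟨fun hh => absurd hh (by decide), fun hh => absurd hh hcur⟩
    · rw [List.set_eq_of_length_le (by omega)]
      exact h2 c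
  · rw [List.getD_eq_getElem?_getD, List.getElem?_set_ne (fun hh => hcm hh.symm),
        ← List.getD_eq_getElem?_getD]
    exact h2 c

theorem pvRowGet (maze : List (List String)) (i : Int) (k : Nat) (row' : List String)
    (hki : PySem.List.pyIdx? maze.length i = some k) :
    PySem.List.pyGetD (maze.set k row') i [] = row' := by
  have hk := pvIdx_lt hki
  have h' : PySem.List.pyIdx? (maze.set k row').length i = some k := by
    rw [List.length_set]; exact hki
  rw [pvGetD_idx _ _ _ _ h', List.getD_eq_getElem?_getD, List.getElem?_set_self hk]
  rfl

theorem pvSetCellEq (maze : List (List String)) (i : Int) (k : Nat) (row' : List String)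
    (c : Int) (v : String) (hc : 0 ≤ c)
    (hki : PySem.List.pyIdx? maze.length i = some k) :
    pvSetCell (maze.set k row') i c v = maze.set k (row'.set c.toNat v) := by
  unfold pvSetCell
  rw [pvRowGet maze i k row' hki]
  have h' : PySem.List.pyIdx? (maze.set k row').length i = some k := by
    rw [List.length_set]; exact hki
  rw [pvSetD_idx _ _ _ _ h', PySem.List.pySetD_of_nonneg _ _ hc, List.set_set]

theorem pvPrevStable (maze : List (List String)) (i : Int) (k : Nat) (row' : List String)
    (hne : PySem.List.pyIdx? maze.length (i-1) ≠ some k) :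
    PySem.List.pyGetD (maze.set k row') (i-1) [] = PySem.List.pyGetD maze (i-1) [] := by
  cases hkp : PySem.List.pyIdx? maze.length (i-1) with
  | none =>
    rw [pvGetD_none _ _ _ (by rw [List.length_set]; exact hkp), pvGetD_none _ _ _ hkp]
  | some kp =>
    have hkpk : kp ≠ k := fun h => hne (h ▸ hkp)
    rw [pvGetD_idx _ _ _ _ (by rw [List.length_set]; exact hkp), pvGetD_idx _ _ _ _ hkp,
        List.getD_eq_getElem?_getD, List.getD_eq_getElem?_getD,
        List.getElem?_set_ne (fun h => hkpk h.symm)]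

theorem pvStepC (maze : List (List String)) (i w : Int) (k : Nat)
    (hki : PySem.List.pyIdx? maze.length i = some k)
    (hne : PySem.List.pyIdx? maze.length (i-1) ≠ some k)
    (row' : List String)
    (h1 : row'.length = (PySem.List.pyGetD maze i []).length)
    (h2 : ∀ c : Nat, (row'.getD c "" = "^" ↔ (PySem.List.pyGetD maze i []).getD c "" = "^"))
    (j : Int) (hj : 0 ≤ j) (S : Int) :
    ∃ row'' : List String,
      row''.length = (PySem.List.pyGetD maze i []).length ∧
      (∀ c : Nat, (row''.getD c "" = "^" ↔ (PySem.List.pyGetD maze i []).getD c "" = "^")) ∧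
      pvStepA i w (maze.set k row', S) j = (maze.set k row'', S + pvContrib maze i j) := by
  have hgp := pvPrevStable maze i k row' hne
  have hgi := pvRowGet maze i k row' hki
  by_cases houter : (PySem.List.pyGetD (PySem.List.pyGetD maze (i-1) []) j "" = "S"
      ∨ PySem.List.pyGetD (PySem.List.pyGetD maze (i-1) []) j "" = "|")
  · by_cases hhat : PySem.List.pyGetD (PySem.List.pyGetD maze i []) j "" = "^"
    · -- counted column: the '^' cell itself is never written
      have hcur : (PySem.List.pyGetD maze i []).getD j.toNat "" = "^" := by
        rw [← pvColGet _ _ _ hj]; exact hhat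
      have hrow : row'.getD j.toNat "" = "^" := (h2 j.toNat).mpr hcur
      have hcontrib : pvContrib maze i j = 1 := by
        unfold pvContrib; rw [if_pos ⟨houter, hhat⟩]
      by_cases hc1 : 0 < j ∧ PySem.List.pyGetD row' (j-1) "" ≠ "^"
      · have hne1 : row'.getD (j-1).toNat "" ≠ "^" := by
          rw [← pvColGet _ _ _ (by omega)]; exact hc1.2
        obtain ⟨i1l, i1c⟩ := pvInvSet _ row' (j-1).toNat h1 h2 hne1
        have hgi1 := pvRowGet maze i k (row'.set (j-1).toNat "|") hki
        by_cases hc2 : j < w - 1 ∧ PySem.List.pyGetD (row'.set (j-1).toNat "|") (j+1) "" ≠ "^"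
        · have hne2 : (row'.set (j-1).toNat "|").getD (j+1).toNat "" ≠ "^" := by
            rw [← pvColGet _ _ _ (by omega)]; exact hc2.2
          obtain ⟨i2l, i2c⟩ := pvInvSet _ _ (j+1).toNat i1l i1c hne2
          refine ⟨(row'.set (j-1).toNat "|").set (j+1).toNat "|", i2l, i2c, ?_⟩
          rw [hcontrib]
          dsimp only [pvStepA]
          rw [hgp, if_pos houter, hgi, pvColGet row' j "" hj, if_pos hrow, if_pos hc1,
              pvSetCellEq maze i k row' (j-1) "|" (by omega) hki, hgi1, if_pos hc2,
              pvSetCellEq maze i k _ (j+1) "|" (by omega) hki]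
        · refine ⟨row'.set (j-1).toNat "|", i1l, i1c, ?_⟩
          rw [hcontrib]
          dsimp only [pvStepA]
          rw [hgp, if_pos houter, hgi, pvColGet row' j "" hj, if_pos hrow, if_pos hc1,
              pvSetCellEq maze i k row' (j-1) "|" (by omega) hki, hgi1, if_neg hc2]
      · by_cases hc2 : j < w - 1 ∧ PySem.List.pyGetD row' (j+1) "" ≠ "^"
        · have hne2 : row'.getD (j+1).toNat "" ≠ "^" := by
            rw [← pvColGet _ _ _ (by omega)]; exact hc2.2
          obtain ⟨i2l, i2c⟩ := pvInvSet _ row' (j+1).toNat h1 h2 hne2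
          refine ⟨row'.set (j+1).toNat "|", i2l, i2c, ?_⟩
          rw [hcontrib]
          dsimp only [pvStepA]
          rw [hgp, if_pos houter, hgi, pvColGet row' j "" hj, if_pos hrow, if_neg hc1, hgi,
              if_pos hc2, pvSetCellEq maze i k row' (j+1) "|" (by omega) hki]
        · refine ⟨row', h1, h2, ?_⟩
          rw [hcontrib]
          dsimp only [pvStepA]
          rw [hgp, if_pos houter, hgi, pvColGet row' j "" hj, if_pos hrow, if_neg hc1, hgi,
              if_neg hc2]
    · -- upper cell marked but this cell is not '^': A writes '|' into a non-'^' cell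
      have hz : ¬ (PySem.List.pyGetD maze i []).getD j.toNat "" = "^" := by
        rw [← pvColGet _ _ _ hj]; exact hhat
      have hrowne : ¬ row'.getD j.toNat "" = "^" := fun hh => hz ((h2 j.toNat).mp hh)
      obtain ⟨i1l, i1c⟩ := pvInvSet _ row' j.toNat h1 h2 hrowne
      refine ⟨row'.set j.toNat "|", i1l, i1c, ?_⟩
      have hcontrib : pvContrib maze i j = 0 := by
        unfold pvContrib; rw [if_neg (fun hh => hhat hh.2)]
      rw [hcontrib]
      dsimp only [pvStepA]
      rw [hgp, if_pos houter, hgi, pvColGet row' j "" hj, if_neg hrowne,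
          pvSetCellEq maze i k row' j "|" hj hki, add_zero]
  · refine ⟨row', h1, h2, ?_⟩
    have hcontrib : pvContrib maze i j = 0 := by
      unfold pvContrib; rw [if_neg (fun hh => houter hh.1)]
    rw [hcontrib]
    dsimp only [pvStepA]
    rw [hgp, if_neg houter, add_zero]

theorem pvFoldC (maze : List (List String)) (i w : Int) (k : Nat)
    (hki : PySem.List.pyIdx? maze.length i = some k)
    (hne : PySem.List.pyIdx? maze.length (i-1) ≠ some k) :
    ∀ t : Nat, ∃ row' : List String,
      (PySem.List.pyRange 0 (t : Int) 1).foldl (pvStepA i w) (maze, 0) =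
        (maze.set k row', ((PySem.List.pyRange 0 (t : Int) 1).map (pvContrib maze i)).sum) := by
  have hk := pvIdx_lt hki
  have base : ∃ row' : List String,
      row'.length = (PySem.List.pyGetD maze i []).length ∧
      (∀ c : Nat, (row'.getD c "" = "^" ↔ (PySem.List.pyGetD maze i []).getD c "" = "^")) ∧
      (maze, (0:Int)) = (maze.set k row', 0) := by
    refine ⟨PySem.List.pyGetD maze i [], rfl, fun c => Iff.rfl, ?_⟩
    have hrow : PySem.List.pyGetD maze i [] = maze[k] := by
      rw [pvGetD_idx _ _ _ _ hki, List.getD_eq_getElem?_getD, List.getElem?_eq_getElem hk]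
      rfl
    rw [hrow, List.set_getElem_self hk]
  -- strengthen with the invariant
  suffices h : ∀ t : Nat, ∃ row' : List String,
      row'.length = (PySem.List.pyGetD maze i []).length ∧
      (∀ c : Nat, (row'.getD c "" = "^" ↔ (PySem.List.pyGetD maze i []).getD c "" = "^")) ∧
      (PySem.List.pyRange 0 (t : Int) 1).foldl (pvStepA i w) (maze, 0) =
        (maze.set k row', ((PySem.List.pyRange 0 (t : Int) 1).map (pvContrib maze i)).sum) by
    intro t; obtain ⟨row', _, _, he⟩ := h t; exact ⟨row', he⟩
  intro t
  induction t with
  | zero =>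
    obtain ⟨row', hl, hc, he⟩ := base
    refine ⟨row', hl, hc, ?_⟩
    rw [PySem.List.pyRange_one_eq_nil (by simp : ((0:Nat):Int) ≤ 0)]
    simpa using he
  | succ t ih =>
    obtain ⟨row', hl, hc, heq⟩ := ih
    obtain ⟨row'', hl2, hc2, hstep⟩ :=
      pvStepC maze i w k hki hne row' hl hc (t : Int) (by positivity)
        (((PySem.List.pyRange 0 (t : Int) 1).map (pvContrib maze i)).sum)
    refine ⟨row'', hl2, hc2, ?_⟩
    have hcast : ((t + 1 : Nat) : Int) = (t : Int) + 1 := by push_cast; ring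
    rw [hcast, PySem.List.pyRange_one_succ_right (by positivity : (0:Int) ≤ (t:Int))]
    rw [List.foldl_append, heq, List.foldl_cons, List.foldl_nil, hstep,
        List.map_append, List.sum_append]
    simp

theorem pvMain (maze : List (List String)) (i : Int) :
    run_classical_line maze i = run_classical_line_alt maze i := by
  have halt : run_classical_line_alt maze i =
      ((PySem.List.pyRange 0 ((PySem.List.pyGetD maze 0 []).length : Int) 1).map
        (pvContrib maze i)).sum := rfl
  cases hki : PySem.List.pyIdx? maze.length i with
  | none =>
    have H : ∀ mz : List (List String), mz.length = maze.length → ∀ j : Int,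
        ¬((PySem.List.pyGetD (PySem.List.pyGetD mz (i-1) []) j "" = "S"
           ∨ PySem.List.pyGetD (PySem.List.pyGetD mz (i-1) []) j "" = "|")
          ∧ PySem.List.pyGetD (PySem.List.pyGetD mz i []) j "" = "^") := by
      intro mz hlen j h
      have h0 : PySem.List.pyGetD mz i [] = [] := pvGetD_none _ _ _ (by rw [hlen]; exact hki)
      rw [h0, pvGetD_nil] at h
      exact absurd h.2 (by decide)
    have hA : run_classical_line maze i = 0 :=
      pvFold_const i _ maze.length H _ maze 0 rfl
    rw [hA, halt]
    refine (List.sum_eq_zero ?_).symm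
    intro x hx
    simp only [List.mem_map] at hx
    obtain ⟨j, _, rfl⟩ := hx
    unfold pvContrib
    rw [if_neg (H maze rfl j)]
  | some k =>
    by_cases halias : PySem.List.pyIdx? maze.length (i-1) = some k
    · -- row i-1 IS row i (len(maze)=1, i=0): a cell cannot be 'S'/'|' and '^' at once
      have H : ∀ mz : List (List String), mz.length = maze.length → ∀ j : Int,
          ¬((PySem.List.pyGetD (PySem.List.pyGetD mz (i-1) []) j "" = "S"
             ∨ PySem.List.pyGetD (PySem.List.pyGetD mz (i-1) []) j "" = "|")
            ∧ PySem.List.pyGetD (PySem.List.pyGetD mz i []) j "" = "^") := by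
        intro mz hlen j h
        have e1 : PySem.List.pyGetD mz (i-1) [] = mz.getD k [] :=
          pvGetD_idx _ _ _ _ (by rw [hlen]; exact halias)
        have e2 : PySem.List.pyGetD mz i [] = mz.getD k [] :=
          pvGetD_idx _ _ _ _ (by rw [hlen]; exact hki)
        rw [e1, e2] at h
        rcases h with ⟨h1 | h1, h2⟩ <;> rw [h1] at h2 <;> exact absurd h2 (by decide)
      have hA : run_classical_line maze i = 0 :=
        pvFold_const i _ maze.length H _ maze 0 rfl
      rw [hA, halt]
      refine (List.sum_eq_zero ?_).symm
      intro x hx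
      simp only [List.mem_map] at hx
      obtain ⟨j, _, rfl⟩ := hx
      unfold pvContrib
      rw [if_neg (H maze rfl j)]
    · obtain ⟨row', heq⟩ :=
        pvFoldC maze i ((PySem.List.pyGetD maze 0 []).length : Int) k hki halias
          ((PySem.List.pyGetD maze 0 []).length)
      rw [halt]
      show ((PySem.List.pyRange 0 ((PySem.List.pyGetD maze 0 []).length : Int) 1).foldl
        (pvStepA i ((PySem.List.pyGetD maze 0 []).length : Int)) (maze, 0)).2 = _
      rw [heq]

-- ===== VERDICT (by name: the statement is the Claim_ definition above) =====
theorem run_classical_line_spec : Claim_equal_run_classical_line := by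
  intro maze i _ _
  exact pvMain maze i
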